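-- pv_equiv track=rewrite | github.com/TencentCloudADP/youtu-rag | integrations/ADG/src/tools/tools.py | _is_font_different
-- ===== SOURCE A (Python) =====
-- def _is_font_different(fonts1, fonts2):
--     """判断两组字体是否不同"""
--     if len(fonts1) != len(fonts2):
--         return True
--
--     for f1, f2 in zip(fonts1, fonts2):
--         if (f1.get("bold") != f2.get("bold") or
--             f1.get("size") != f2.get("size") or
--             f1.get("name") != f2.get("name")):
--             return True
--
--     return False
-- ===== SOURCE B (Python) =====
-- def _is_font_different(fonts1, fonts2):
--     """判断两组字体是否不同"""
--     return any(
--         [f.get(k) for f in fonts1] != [f.get(k) for f in fonts2]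
--         for k in ("bold", "size", "name")
--     )
-- ===== Notes on version B (the rewrite author's own statement) =====
-- stated objective: alternative
-- what changed: Transposes the comparison from row-major to column-major: instead of a length guard plus an early-exit per-element loop over all three fields, B makes one pass per field, extracting that field's column from each list and comparing the two columns (a length mismatch shows up as unequal columns).
import Mathlib
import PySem

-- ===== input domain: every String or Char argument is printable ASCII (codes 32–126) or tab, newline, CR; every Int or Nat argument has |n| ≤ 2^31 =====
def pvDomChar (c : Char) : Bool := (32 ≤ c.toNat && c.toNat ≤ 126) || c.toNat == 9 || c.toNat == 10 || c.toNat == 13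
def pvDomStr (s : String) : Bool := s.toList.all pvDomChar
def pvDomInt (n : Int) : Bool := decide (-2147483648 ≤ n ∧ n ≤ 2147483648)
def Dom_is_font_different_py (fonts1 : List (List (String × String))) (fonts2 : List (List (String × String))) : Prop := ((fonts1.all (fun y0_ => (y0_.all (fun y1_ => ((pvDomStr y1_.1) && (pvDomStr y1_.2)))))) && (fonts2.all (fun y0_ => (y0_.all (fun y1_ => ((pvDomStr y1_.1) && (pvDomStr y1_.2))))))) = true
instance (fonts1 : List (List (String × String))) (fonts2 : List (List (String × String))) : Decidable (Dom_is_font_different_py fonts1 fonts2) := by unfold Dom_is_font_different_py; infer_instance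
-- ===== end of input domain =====

-- B compares column-major (one pass per field over each list, columns compared whole) instead of A's length guard + row-major early-exit loop; return value only.


-- ===== PORT A =====
-- loop over zip(fonts1, fonts2) with early exit (True on first field mismatch)
def fdLoop : List (List (String × String) × List (String × String)) → Bool
  | [] => false
  | (f1, f2) :: rest =>
    if (PySem.Dict.mk f1).get? "bold" ≠ (PySem.Dict.mk f2).get? "bold" ∨
       (PySem.Dict.mk f1).get? "size" ≠ (PySem.Dict.mk f2).get? "size" ∨
       (PySem.Dict.mk f1).get? "name" ≠ (PySem.Dict.mk f2).get? "name" then true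
    else fdLoop rest

def is_font_different_py (fonts1 : List (List (String × String))) (fonts2 : List (List (String × String))) : Bool :=
  if fonts1.length ≠ fonts2.length then true
  else fdLoop (fonts1.zip fonts2)

-- ===== PORT B =====
-- B: the column of field k — one pass per field ([f.get(k) for f in fonts])
def fdCol (k : String) (fonts : List (List (String × String))) : List (Option String) :=
  fonts.map (fun f => (PySem.Dict.mk f).get? k)

def is_font_different_py_alt (fonts1 : List (List (String × String))) (fonts2 : List (List (String × String))) : Bool :=
  (["bold", "size", "name"] : List String).any (fun k => decide (fdCol k fonts1 ≠ fdCol k fonts2))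

-- ===== PRECONDITION & SPEC =====
def Spec_is_font_different_py (fonts1 : List (List (String × String))) (fonts2 : List (List (String × String))) (out : Bool) : Prop := out = is_font_different_py_alt fonts1 fonts2
instance (fonts1 : List (List (String × String))) (fonts2 : List (List (String × String))) (out : Bool) : Decidable (Spec_is_font_different_py fonts1 fonts2 out) := by unfold Spec_is_font_different_py; infer_instance

-- ===== CLAIM (what is proved, stated in full; the proofs are below) =====
def Claim_equal_is_font_different_py : Prop := ∀ (fonts1 : List (List (String × String))) (fonts2 : List (List (String × String))), Dom_is_font_different_py fonts1 fonts2 → Spec_is_font_different_py fonts1 fonts2 (is_font_different_py fonts1 fonts2)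

-- ===== LEMMAS AND PROOFS =====
lemma fdLoop_eq (l1 l2 : List (List (String × String)))
    (h : l1.length = l2.length) :
    fdLoop (l1.zip l2)
      = (fdCol "bold" l1 ≠ fdCol "bold" l2 ∨ fdCol "size" l1 ≠ fdCol "size" l2 ∨
         fdCol "name" l1 ≠ fdCol "name" l2 : Bool) := by
  induction l1 generalizing l2 with
  | nil => cases l2 with
    | nil => simp [fdLoop, fdCol]
    | cons b bs => simp at h
  | cons a as ih =>
    cases l2 with
    | nil => simp at h
    | cons b bs =>
      simp only [List.length_cons, Nat.add_right_cancel_iff] at h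
      simp only [List.zip_cons_cons, fdLoop, fdCol, List.map_cons]
      by_cases hb : (PySem.Dict.mk a).get? "bold" ≠ (PySem.Dict.mk b).get? "bold" ∨
          (PySem.Dict.mk a).get? "size" ≠ (PySem.Dict.mk b).get? "size" ∨
          (PySem.Dict.mk a).get? "name" ≠ (PySem.Dict.mk b).get? "name"
      · rw [if_pos hb]
        rcases hb with h1 | h1 | h1 <;> simp [h1]
      · rw [if_neg hb]
        push_neg at hb
        have := ih bs h
        simp only [fdCol] at this
        simp [this, hb.1, hb.2.1, hb.2.2]

lemma fdCol_len_ne (k : String) (l1 l2 : List (List (String × String)))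
    (h : l1.length ≠ l2.length) : fdCol k l1 ≠ fdCol k l2 := by
  intro hc
  exact h (by simpa [fdCol] using congrArg List.length hc)

-- ===== VERDICT (by name: the statement is the Claim_ definition above) =====
theorem is_font_different_py_spec : Claim_equal_is_font_different_py := by
  intro fonts1 fonts2 _
  unfold Spec_is_font_different_py is_font_different_py is_font_different_py_alt
  by_cases hl : fonts1.length = fonts2.length
  · simp only [hl, ne_eq, not_true_eq_false, if_false]
    rw [fdLoop_eq _ _ hl]
    simp [List.any]
  · have hb := fdCol_len_ne "bold" _ _ hl
    simp [hl, hb]
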